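-- pv_equiv track=rewrite | github.com/YuiHyuuga/Tabelas-INMET | main.py | nometabela
-- ===== SOURCE A (Python) =====
-- def nometabela(caminho):
--     bar = 0
--     contador = 0
--     nome = ""
--     for j in caminho:
--         if j == "/":
--             bar += 1
--         contador += 1
--         if bar >= 8:
--             nome = caminho[contador:]
--             break
--     return nome
-- ===== SOURCE B (Python) =====
-- def nometabela(caminho):
--     # idiomatic: tokenize on "/" and rejoin everything after the first 8 slashes
--     return "/".join(caminho.split("/")[8:])
-- ===== Notes on version B (the rewrite author's own statement) =====
-- stated objective: idiomatic
-- what changed: Replaced the manual character-by-character slash-counting scan (with an explicit break and a positional slice) by a split-on-'/'/drop-8-tokens/rejoin one-liner.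
import Mathlib
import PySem

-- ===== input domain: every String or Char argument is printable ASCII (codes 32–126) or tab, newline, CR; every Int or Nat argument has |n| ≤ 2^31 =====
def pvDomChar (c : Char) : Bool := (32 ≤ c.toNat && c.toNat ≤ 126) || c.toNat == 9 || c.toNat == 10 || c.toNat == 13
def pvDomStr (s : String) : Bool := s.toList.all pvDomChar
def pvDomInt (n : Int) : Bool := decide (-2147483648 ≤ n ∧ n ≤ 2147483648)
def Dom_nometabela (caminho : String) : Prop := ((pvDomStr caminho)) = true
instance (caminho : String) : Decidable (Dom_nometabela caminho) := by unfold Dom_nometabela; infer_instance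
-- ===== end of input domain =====

-- A counts '/' characters one by one and slices after the 8th; B splits on "/", drops 8 tokens
-- and rejoins — an idiomatic tokenize-then-slice re-implementation (same result, same cost).


-- ===== PORT A =====
-- the for-loop over the characters of caminho, with its early break
def nometabelaLoop (caminho : String) : List Char → Int → Int → String → String
  | [], _, _, nome => nome
  | j :: rest, bar, contador, nome =>
    let bar' := if j = '/' then bar + 1 else bar
    let contador' := contador + 1
    if bar' ≥ 8 then PySem.Str.slice caminho (some contador') none   -- nome = caminho[contador:]; break
    else nometabelaLoop caminho rest bar' contador' nome

def nometabela (caminho : String) : String :=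
  nometabelaLoop caminho caminho.toList 0 0 ""

-- ===== PORT B =====
-- "/".join(caminho.split("/")[8:]); split? is total here since the separator "/" is non-empty
def nometabela_alt (caminho : String) : String :=
  match PySem.Str.split? caminho "/" with
  | some partes => PySem.Str.join "/" (PySem.List.slice partes (some 8) none)
  | none => ""

-- ===== PRECONDITION & SPEC =====
def Spec_nometabela (caminho : String) (out : String) : Prop := out = nometabela_alt caminho
instance (caminho : String) (out : String) : Decidable (Spec_nometabela caminho out) := by unfold Spec_nometabela; infer_instance

-- ===== CLAIM (what is proved, stated in full; the proofs are below) =====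
def Claim_equal_nometabela : Prop := ∀ (caminho : String), Dom_nometabela caminho → Spec_nometabela caminho (nometabela caminho)

-- ===== LEMMAS AND PROOFS =====

-- simple structural split on a single '/' (proved equal to PySem.Chars.splitOn below)
def spSlash : List Char → List (List Char)
  | [] => [[]]
  | c :: r => if c = '/' then [] :: spSlash r
              else match spSlash r with
                   | [] => [[c]]          -- unreachable: spSlash never returns []
                   | p :: ps => (c :: p) :: ps

-- the common specification: the suffix after the k-th '/' (k ≥ 1), or [] if fewer slashes
def afterSlash : List Char → Nat → List Char
  | [], _ => []
  | c :: r, k => if c = '/' then (if k = 1 then r else afterSlash r (k - 1))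
                 else afterSlash r k

theorem spSlash_ne_nil (l : List Char) : spSlash l ≠ [] := by
  cases l with
  | nil => simp [spSlash]
  | cons c r =>
    simp only [spSlash]
    split
    · simp
    · split <;> simp

theorem splitOn_go_spec (fuel : Nat) (l cur : List Char) (acc : List (List Char))
    (h : l.length < fuel) :
    PySem.Chars.splitOn.go ['/'] fuel l cur acc =
      acc.reverse ++ (match spSlash l with
                      | [] => [cur.reverse]
                      | p :: ps => (cur.reverse ++ p) :: ps) := by
  induction fuel generalizing l cur acc with
  | zero => omega
  | succ f ih =>
    cases l with
    | nil => simp [PySem.Chars.splitOn.go, spSlash]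
    | cons c r =>
      by_cases hc : c = '/'
      · subst hc
        have hpre : List.isPrefixOf ['/'] ('/' :: r) = true := by
          simp [List.isPrefixOf]
        rw [show PySem.Chars.splitOn.go ['/'] (f + 1) ('/' :: r) cur acc =
              PySem.Chars.splitOn.go ['/'] f (List.drop (['/'] : List Char).length ('/' :: r)) [] (cur.reverse :: acc) by
            simp [PySem.Chars.splitOn.go, hpre]]
        simp only [List.length_singleton, List.drop_succ_cons, List.drop_zero]
        rw [ih r [] (cur.reverse :: acc) (by simpa using Nat.lt_of_succ_lt_succ (by simpa using h))]
        rcases hr : spSlash r with _ | ⟨p, ps⟩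
        · exact absurd hr (spSlash_ne_nil r)
        · simp [spSlash, hr]
      · have hpre : List.isPrefixOf ['/'] (c :: r) = false := by
          have hne : ('/' : Char) ≠ c := fun h => hc h.symm
          simp [List.isPrefixOf, hne]
        rw [show PySem.Chars.splitOn.go ['/'] (f + 1) (c :: r) cur acc =
              PySem.Chars.splitOn.go ['/'] f r (c :: cur) acc by
            simp [PySem.Chars.splitOn.go, hpre]]
        rw [ih r (c :: cur) acc (by simpa using Nat.lt_of_succ_lt_succ (by simpa using h))]
        rcases hr : spSlash r with _ | ⟨p, ps⟩
        · exact absurd hr (spSlash_ne_nil r)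
        · simp [spSlash, hc, hr]

theorem splitOn_eq_spSlash (s : List Char) :
    PySem.Chars.splitOn s ['/'] = spSlash s := by
  unfold PySem.Chars.splitOn
  rw [splitOn_go_spec (s.length + 1) s [] [] (Nat.lt_succ_self _)]
  rcases hr : spSlash s with _ | ⟨p, ps⟩
  · exact absurd hr (spSlash_ne_nil s)
  · simp

theorem join_cons_head (sep c : List Char) (p : List Char) (ps : List (List Char)) :
    PySem.Chars.join sep ((c ++ p) :: ps) = c ++ PySem.Chars.join sep (p :: ps) := by
  cases ps with
  | nil => simp [PySem.Chars.join_singleton]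
  | cons q qs => simp [PySem.Chars.join_cons_cons]

theorem join_spSlash (s : List Char) :
    PySem.Chars.join ['/'] (spSlash s) = s := by
  induction s with
  | nil => simp [spSlash, PySem.Chars.join_singleton]
  | cons c r ih =>
    by_cases hc : c = '/'
    · subst hc
      rcases hr : spSlash r with _ | ⟨p, ps⟩
      · exact absurd hr (spSlash_ne_nil r)
      · simp only [spSlash, hr, if_true]
        rw [PySem.Chars.join_cons_cons]
        rw [hr] at ih
        simp [ih]
    · rcases hr : spSlash r with _ | ⟨p, ps⟩
      · exact absurd hr (spSlash_ne_nil r)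
      · simp only [spSlash, if_neg hc, hr]
        have := join_cons_head ['/'] [c] p ps
        simp only [List.singleton_append] at this
        rw [this]
        rw [hr] at ih
        simp [ih]

-- B computes afterSlash: dropping k ≥ 1 pieces and rejoining is the suffix after the k-th '/'
theorem join_drop_spSlash (s : List Char) (k : Nat) (hk : 1 ≤ k) :
    PySem.Chars.join ['/'] ((spSlash s).drop k) = afterSlash s k := by
  induction s generalizing k with
  | nil =>
    rcases k with _ | k
    · omega
    · simp [spSlash, afterSlash, PySem.Chars.join_nil]
  | cons c r ih =>
    by_cases hc : c = '/'
    · subst hc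
      simp only [spSlash, afterSlash, if_true]
      rcases k with _ | k
      · omega
      · rcases k with _ | k
        · simp [join_spSlash r]
        · have := ih (k + 1) (by omega)
          simpa using this
    · rcases hr : spSlash r with _ | ⟨p, ps⟩
      · exact absurd hr (spSlash_ne_nil r)
      · simp only [spSlash, if_neg hc, hr, afterSlash]
        rcases k with _ | k
        · omega
        · have := ih (k + 1) (by omega)
          rw [hr] at this
          simpa using this

-- A's loop computes afterSlash: bar = 8 - k slashes seen so far, contador = d characters consumed
theorem nometabelaLoop_spec (caminho : String) :
    ∀ (r : List Char) (d k : Nat), 1 ≤ k → k ≤ 8 → r = caminho.toList.drop d →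
      nometabelaLoop caminho r ((8 : Int) - (k : Int)) (d : Int) "" =
        String.ofList (afterSlash r k) := by
  intro r
  induction r with
  | nil =>
    intro d k _ _ _
    simp [nometabelaLoop, afterSlash]
  | cons c rest ih =>
    intro d k hk1 hk8 hd
    have hrest : rest = caminho.toList.drop (d + 1) := by
      rw [← List.tail_drop, ← hd]
      rfl
    by_cases hc : c = '/'
    · subst hc
      by_cases hk : k = 1
      · subst hk
        simp only [nometabelaLoop, if_true]
        rw [if_pos (by omega : (8 : Int) - ((1 : Nat) : Int) + 1 ≥ 8)]
        have hcast : (d : Int) + 1 = ((d + 1 : Nat) : Int) := by push_cast; ring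
        rw [hcast]
        simp only [PySem.Str.slice]
        rw [PySem.Chars.slice_eq_listSlice, PySem.List.slice_from_natCast]
        rw [← hrest]
        simp [afterSlash]
      · have hbar : ¬ ((8 : Int) - (k : Int) + 1 ≥ 8) := by
          have : 2 ≤ k := by omega
          omega
        simp only [nometabelaLoop, if_true]
        rw [if_neg hbar]
        have hcast : (d : Int) + 1 = ((d + 1 : Nat) : Int) := by push_cast; ring
        have hcast2 : (8 : Int) - (k : Int) + 1 = (8 : Int) - ((k - 1 : Nat) : Int) := by
          have : 1 ≤ k := hk1
          push_cast [Nat.cast_sub this]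
          ring
        rw [hcast, hcast2, ih (d + 1) (k - 1) (by omega) (by omega) hrest]
        simp [afterSlash, hk]
    · have hbar : ¬ ((8 : Int) - (k : Int) ≥ 8) := by omega
      simp only [nometabelaLoop, if_neg hc]
      rw [if_neg hbar]
      have hcast : (d : Int) + 1 = ((d + 1 : Nat) : Int) := by push_cast; ring
      rw [hcast, ih (d + 1) k hk1 hk8 hrest]
      simp [afterSlash, hc]

theorem nometabela_eq (caminho : String) :
    nometabela caminho = String.ofList (afterSlash caminho.toList 8) := by
  unfold nometabela
  have := nometabelaLoop_spec caminho caminho.toList 0 8 (by omega) (by omega) (by simp)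
  simpa using this

theorem nometabela_alt_eq (caminho : String) :
    nometabela_alt caminho = String.ofList (afterSlash caminho.toList 8) := by
  unfold nometabela_alt
  have hsplit : PySem.Str.split? caminho "/" =
      some ((PySem.Chars.splitOn caminho.toList ['/']).map String.ofList) := by
    simp [PySem.Str.split?, PySem.Chars.split?]
  rw [hsplit]
  simp only [PySem.Str.join]
  have hslice := PySem.List.slice_from
      ((PySem.Chars.splitOn caminho.toList ['/']).map String.ofList) (by omega : (0 : Int) ≤ 8)
  rw [hslice]
  congr 1
  rw [splitOn_eq_spSlash]
  rw [← List.map_drop, List.map_map]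
  have : (String.toList ∘ String.ofList) = (id : List Char → List Char) := by
    funext l; simp
  rw [this, List.map_id]
  show PySem.Chars.join ['/'] ((spSlash caminho.toList).drop (8 : Int).toNat) = _
  rw [show ((8 : Int).toNat) = 8 from rfl]
  exact join_drop_spSlash caminho.toList 8 (by omega)

-- ===== VERDICT (by name: the statement is the Claim_ definition above) =====
theorem nometabela_spec : Claim_equal_nometabela := by
  intro caminho _
  unfold Spec_nometabela
  rw [nometabela_eq, nometabela_alt_eq]
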